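-- pv_equiv track=rewrite | github.com/MGI-EU/Docker_Image_of_ATOPlex_Pipeline | assets/ATOPlex_Pipeline_Report.Scripts.consensusSeqFiltering.py | seqCheck
-- ===== SOURCE A (Python) =====
-- def seqCheck(seq:str):
--     seq = seq.upper()
--     call = len(seq)
--     cdict = dict()
--     for c in seq:
--         cdict[c] = cdict.get(c, 0) + 1
--     cAm = call - cdict.get("N", 0) - cdict.get("A", 0) - cdict.get("T", 0) - cdict.get("C", 0) - cdict.get("G", 0)
--     return (call, cdict.get("N", 0), cAm)
-- ===== SOURCE B (Python) =====
-- def seqCheck(seq: str):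
--     n = 0
--     cAm = 0
--     for c in seq.upper():
--         if c == 'N':
--             n += 1
--         elif c not in 'ATCG':
--             cAm += 1
--     return (len(seq), n, cAm)
-- ===== Notes on version B (the rewrite author's own statement) =====
-- stated objective: simpler
-- what changed: Replaced the per-character frequency dictionary and five subsequent dict lookups with a single pass keeping two scalar counters (N count and non-ATCGN count) via an explicit branch.
import Mathlib
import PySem

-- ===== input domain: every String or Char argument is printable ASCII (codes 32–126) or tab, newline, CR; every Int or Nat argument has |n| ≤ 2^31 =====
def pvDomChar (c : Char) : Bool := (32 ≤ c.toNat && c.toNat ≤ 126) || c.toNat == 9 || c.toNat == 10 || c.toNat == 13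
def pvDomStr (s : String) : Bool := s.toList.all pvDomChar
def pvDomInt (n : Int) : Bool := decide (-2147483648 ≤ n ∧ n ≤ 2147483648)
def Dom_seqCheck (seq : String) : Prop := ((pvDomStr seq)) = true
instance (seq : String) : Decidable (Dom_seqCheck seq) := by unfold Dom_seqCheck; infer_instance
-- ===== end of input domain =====

-- B replaces A's per-character frequency dictionary (and its five lookups) with one pass
-- keeping two scalar counters; objective: simpler.

-- ===== PORT A =====
def seqCheck (seq : String) : Int × Int × Int :=
  let s := PySem.Str.upper seq
  let call : Int := PySem.Str.len s
  let cdict : PySem.Dict Char Int :=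
    s.toList.foldl (fun d c => d.insert c (d.getD c 0 + 1)) PySem.Dict.empty
  let cAm := call - cdict.getD 'N' 0 - cdict.getD 'A' 0 - cdict.getD 'T' 0
               - cdict.getD 'C' 0 - cdict.getD 'G' 0
  (call, cdict.getD 'N' 0, cAm)

-- ===== PORT B =====
def seqCheck_alt (seq : String) : Int × Int × Int :=
  let p := (PySem.Str.upper seq).toList.foldl
    (fun (acc : Int × Int) c =>
      if c = 'N' then (acc.1 + 1, acc.2)
      else if !("ATCG".toList.contains c) then (acc.1, acc.2 + 1)
      else acc)
    (0, 0)
  (PySem.Str.len seq, p.1, p.2)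

-- ===== PRECONDITION & SPEC =====
def Spec_seqCheck (seq : String) (out : Int × Int × Int) : Prop := out = seqCheck_alt seq
instance (seq : String) (out : Int × Int × Int) : Decidable (Spec_seqCheck seq out) := by unfold Spec_seqCheck; infer_instance

-- ===== CLAIM (what is proved, stated in full; the proofs are below) =====
def Claim_equal_seqCheck : Prop := ∀ (seq : String), Dom_seqCheck seq → Spec_seqCheck seq (seqCheck seq)

-- ===== LEMMAS AND PROOFS =====

-- the "ambiguous" predicate: neither 'N' nor one of A/T/C/G (kept opaque so simp leaves it alone)
def pvAmb (c : Char) : Bool := !(c == 'N') && !("ATCG".toList.contains c)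

-- B's loop computes (count of 'N', count of ambiguous characters)
theorem seqCheck_loopB (l : List Char) (p : Int × Int) :
    l.foldl (fun (acc : Int × Int) c =>
      if c = 'N' then (acc.1 + 1, acc.2)
      else if !("ATCG".toList.contains c) then (acc.1, acc.2 + 1)
      else acc) p
    = (p.1 + l.count 'N', p.2 + l.countP pvAmb) := by
  induction l generalizing p with
  | nil => simp
  | cons c l ih =>
    rw [List.foldl_cons, ih]
    by_cases h : c = 'N'
    · subst h
      have e : pvAmb 'N' = false := rfl
      refine Prod.ext ?_ ?_ <;> simp [List.count_cons, List.countP_cons, e] <;> omega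
    · by_cases h2 : c = 'A' ∨ c = 'T' ∨ c = 'C' ∨ c = 'G'
      · refine Prod.ext ?_ ?_ <;> rcases h2 with h2 | h2 | h2 | h2 <;> subst h2 <;>
          simp [List.count_cons, List.countP_cons, show pvAmb 'A' = false from rfl,
            show pvAmb 'T' = false from rfl, show pvAmb 'C' = false from rfl,
            show pvAmb 'G' = false from rfl]
      · have hA : c ≠ 'A' := fun e => h2 (Or.inl e)
        have hT : c ≠ 'T' := fun e => h2 (Or.inr (Or.inl e))
        have hC : c ≠ 'C' := fun e => h2 (Or.inr (Or.inr (Or.inl e)))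
        have hG : c ≠ 'G' := fun e => h2 (Or.inr (Or.inr (Or.inr e)))
        have e : pvAmb c = true := by simp [pvAmb, h, hA, hT, hC, hG]
        refine Prod.ext ?_ ?_ <;>
          simp [h, hA, hT, hC, hG, List.count_cons, List.countP_cons, e] <;> omega

-- every character is 'N', one of A/T/C/G, or ambiguous — the counts partition the length
theorem seqCheck_partition (l : List Char) :
    l.length = l.count 'N' + l.count 'A' + l.count 'T' + l.count 'C' + l.count 'G'
      + l.countP pvAmb := by
  induction l with
  | nil => simp
  | cons c l ih =>
    simp only [List.length_cons, List.count_cons, List.countP_cons]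
    by_cases h : c = 'N'
    · subst h; simp [show pvAmb 'N' = false from rfl]; omega
    · by_cases h2 : c = 'A' ∨ c = 'T' ∨ c = 'C' ∨ c = 'G'
      · rcases h2 with h2 | h2 | h2 | h2 <;> subst h2 <;>
          simp [show pvAmb 'A' = false from rfl, show pvAmb 'T' = false from rfl,
            show pvAmb 'C' = false from rfl, show pvAmb 'G' = false from rfl] <;> omega
      · have hA : c ≠ 'A' := fun e => h2 (Or.inl e)
        have hT : c ≠ 'T' := fun e => h2 (Or.inr (Or.inl e))
        have hC : c ≠ 'C' := fun e => h2 (Or.inr (Or.inr (Or.inl e)))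
        have hG : c ≠ 'G' := fun e => h2 (Or.inr (Or.inr (Or.inr e)))
        have e : pvAmb c = true := by simp [pvAmb, h, hA, hT, hC, hG]
        simp [h, hA, hT, hC, hG, e]
        omega

theorem seqCheck_len_upper (s : String) :
    PySem.Str.len (PySem.Str.upper s) = PySem.Str.len s := by
  simp [PySem.Str.len_eq, PySem.Str.toList_upper, PySem.Chars.upper]

-- ===== VERDICT (by name: the statement is the Claim_ definition above) =====
theorem seqCheck_spec : Claim_equal_seqCheck := by
  intro seq _
  unfold Spec_seqCheck seqCheck seqCheck_alt
  rw [seqCheck_loopB]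
  simp only [PySem.Dict.getD_foldl_insert_add_one, PySem.Dict.getD_empty,
    seqCheck_len_upper, zero_add]
  refine Prod.ext rfl (Prod.ext rfl ?_)
  have h := seqCheck_partition (PySem.Str.upper seq).toList
  have hlen : (PySem.Str.upper seq).toList.length = seq.toList.length := by
    simp [PySem.Str.toList_upper, PySem.Chars.upper]
  simp only [PySem.Str.len_eq]
  omega
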